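-- pv_equiv track=rewrite | github.com/govardhansatya/quantum26 | utils/data_pipeline.py | negation_binding
-- ===== SOURCE A (Python) =====
-- _NEGATION_TOKENS = {
--     "isnt", "wasnt", "dont", "didnt", "wont",
--     "cant", "couldnt", "shouldnt",
--     "not", "never", "no", "neither", "nor",
--     "hardly", "barely",
-- }
--
-- def negation_binding(text: str) -> str:
--     """Join each negation word with its immediately following word.
--
--     This ensures TF-IDF treats *not_good* as a single feature token instead
--     of two independent tokens, preserving directional sentiment.
--
--     Parameters
--     ----------
--     text : str
--         Cleaned text (output of :func:`clean_text`).
--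
--     Returns
--     -------
--     str
--         Text with negation-bound bigrams, e.g. "not_good", "cant_win".
--
--     Examples
--     --------
--     >>> negation_binding("this is not good at all")
--     'this is not_good at all'
--     >>> negation_binding("cant stop wont stop")
--     'cant_stop wont_stop'
--     """
--     tokens = text.split()
--     bound = []
--     skip_next = False
--     for i, token in enumerate(tokens):
--         if skip_next:
--             skip_next = False
--             continue
--         if token in _NEGATION_TOKENS and i + 1 < len(tokens):
--             # bind with following word
--             bound.append(f"{token}_{tokens[i + 1]}")
--             skip_next = True
--         else:
--             bound.append(token)
--     return " ".join(bound)
-- ===== SOURCE B (Python) =====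
-- _NEGATION_TOKENS = {
--     "isnt", "wasnt", "dont", "didnt", "wont",
--     "cant", "couldnt", "shouldnt",
--     "not", "never", "no", "neither", "nor",
--     "hardly", "barely",
-- }
--
--
-- def negation_binding(text: str) -> str:
--     """Run-based rewrite: group the tokens into maximal runs of consecutive
--     negation words; inside each run the words pair up two by two, and an
--     odd-length run additionally captures the first word of the run that
--     follows it.  No per-token skip state is needed."""
--     tokens = text.split()
--     # stage 1: maximal runs of equal negation-membership
--     runs = []  # list of [is_negation, words]
--     for tok in tokens:
--         is_neg = tok in _NEGATION_TOKENS
--         if runs and runs[-1][0] == is_neg: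
--             runs[-1][1].append(tok)
--         else:
--             runs.append((is_neg, [tok]))
--     # stage 2: pair up inside each negation run; an odd run steals the first
--     # word of the following run
--     out = []
--     k = 0
--     while k < len(runs):
--         is_neg, words = runs[k]
--         k += 1
--         if not is_neg:
--             out.extend(words)
--             continue
--         for j in range(0, len(words) - 1, 2):
--             out.append(words[j] + "_" + words[j + 1])
--         if len(words) % 2:
--             if k < len(runs):
--                 follower = runs[k][1]
--                 out.append(words[-1] + "_" + follower[0])
--                 out.extend(follower[1:])
--                 k += 1
--             else:
--                 out.append(words[-1])
--     return " ".join(out)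
-- ===== Notes on version B (the rewrite author's own statement) =====
-- stated objective: alternative
-- what changed: Replaces A's single sequential pass with a skip_next flag by a staged run-based algorithm: first group the tokens into maximal runs of consecutive negation words, then pair the words of each run two by two, an odd-length run stealing the first word of the following run; correct because A's greedy bind-and-skip consumes exactly alternate positions within each maximal negation run.
import Mathlib
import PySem

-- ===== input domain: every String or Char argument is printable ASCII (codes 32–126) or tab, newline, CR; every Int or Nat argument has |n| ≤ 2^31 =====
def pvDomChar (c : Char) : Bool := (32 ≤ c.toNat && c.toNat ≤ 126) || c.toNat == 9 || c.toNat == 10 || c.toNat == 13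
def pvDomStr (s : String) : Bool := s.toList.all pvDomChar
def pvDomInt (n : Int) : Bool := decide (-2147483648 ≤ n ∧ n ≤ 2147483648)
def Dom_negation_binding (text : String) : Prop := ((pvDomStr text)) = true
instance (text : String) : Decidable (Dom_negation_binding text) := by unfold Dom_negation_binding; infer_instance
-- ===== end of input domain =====

-- B replaces A's sequential skip-flag pass by a staged run-based algorithm:
-- group tokens into maximal runs of consecutive negation words, pair each run's
-- words two by two, an odd run stealing the first word of the following run.
-- Objective: alternative (same cost, different algorithm).

-- Python's _NEGATION_TOKENS set; only used for membership tests, so a list is exact.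
def negTokens : List String :=
  ["isnt", "wasnt", "dont", "didnt", "wont",
   "cant", "couldnt", "shouldnt",
   "not", "never", "no", "neither", "nor",
   "hardly", "barely"]

-- ===== PORT A =====
-- A's loop body: state (bound, skip_next), element (i, token); tokens[i+1] via pyGet?
-- (in range whenever the branch fires, so getD "" is never the default).
def negStep (tokens : List String) (st : List String × Bool) (p : Int × String) :
    List String × Bool :=
  if st.2 then (st.1, false)
  else if p.2 ∈ negTokens ∧ p.1 + 1 < (tokens.length : Int) then
    (st.1 ++ [p.2 ++ "_" ++ (PySem.List.pyGet? tokens (p.1 + 1)).getD ""], true)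
  else (st.1 ++ [p.2], false)

-- enumerate + skip flag + index lookup tokens[i+1], step for step as in A.
def negation_binding (text : String) : String :=
  let tokens := PySem.Str.split₀ text
  let res := (PySem.List.enumerate tokens 0).foldl (negStep tokens) ([], false)
  PySem.Str.join " " res.1

-- ===== PORT B =====
-- stage 1 loop body: append tok to the last run if its flag matches, else open a new run
def runsStep (runs : List (Bool × List String)) (tok : String) : List (Bool × List String) :=
  let isNeg := decide (tok ∈ negTokens)
  match runs.getLast? with
  | some r => if r.1 = isNeg then runs.dropLast ++ [(r.1, r.2 ++ [tok])]
              else runs ++ [(isNeg, [tok])]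
  | none => [(isNeg, [tok])]

-- stage 2 while-loop over the runs (k += 1 / k += 2 becomes consuming one or two runs):
-- pairs via the range(0, len-1, 2) loop; words[-1], follower[0], follower[1:] via pyGet?/slice
def procRuns : List (Bool × List String) → List String
  | [] => []
  | (isNeg, words) :: rest =>
    if isNeg = false then words ++ procRuns rest
    else
      ((PySem.List.pyRange 0 ((words.length : Int) - 1) 2).foldl
          (fun acc j => acc ++ [((PySem.List.pyGet? words j).getD "") ++ "_" ++
            ((PySem.List.pyGet? words (j + 1)).getD "")]) [])
        ++
        (if words.length % 2 = 1 then   -- len(words) % 2 (len is a Nat, so Nat mod is exact)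
          match rest with
          | [] => [(PySem.List.pyGet? words (-1)).getD ""]
          | (_, follower) :: rest' =>
            (((PySem.List.pyGet? words (-1)).getD "") ++ "_" ++ ((PySem.List.pyGet? follower 0).getD ""))
              :: (PySem.List.slice follower (some 1) none ++ procRuns rest')
        else procRuns rest)

def negation_binding_alt (text : String) : String :=
  let tokens := PySem.Str.split₀ text
  let runs := tokens.foldl runsStep []
  PySem.Str.join " " (procRuns runs)

-- ===== PRECONDITION & SPEC =====
def Spec_negation_binding (text : String) (out : String) : Prop := out = negation_binding_alt text
instance (text : String) (out : String) : Decidable (Spec_negation_binding text out) := by unfold Spec_negation_binding; infer_instance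

-- ===== CLAIM (what is proved, stated in full; the proofs are below) =====
def Claim_equal_negation_binding : Prop := ∀ (text : String), Dom_negation_binding text → Spec_negation_binding text (negation_binding text)

-- ===== LEMMAS AND PROOFS =====

-- proof-side specification: the greedy bind-and-skip as structural recursion
def bindNext : List String → List String
  | [] => []
  | t :: rest =>
    if t ∈ negTokens then
      match rest with
      | [] => [t]
      | n :: rest' => (t ++ "_" ++ n) :: bindNext rest'
    else t :: bindNext rest

-- proof-side: pairing a run two by two
def pairList : List String → List String
  | [] => []
  | [_] => []
  | a :: b :: t => (a ++ "_" ++ b) :: pairList t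

-- runs invariant: flags alternate, runs are nonempty, flags describe membership
def goodRuns (runs : List (Bool × List String)) : Prop :=
  List.IsChain (· ≠ ·) (runs.map Prod.fst) ∧
  ∀ r ∈ runs, r.2 ≠ [] ∧ ∀ w ∈ r.2, decide (w ∈ negTokens) = r.1

def flatRuns (runs : List (Bool × List String)) : List String :=
  (runs.map Prod.snd).flatten

-- ------- A-side: the fold equals bindNext -------

lemma negStep_skip (tokens acc : List String) (p : Int × String) :
    negStep tokens (acc, true) p = (acc, false) := by simp [negStep]

lemma negStep_bind (tokens acc : List String) (i : Int) (t n : String)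
    (hneg : t ∈ negTokens) (hlt : i + 1 < (tokens.length : Int))
    (hget : PySem.List.pyGet? tokens (i + 1) = some n) :
    negStep tokens (acc, false) (i, t) = (acc ++ [t ++ "_" ++ n], true) := by
  simp [negStep, hneg, hlt, hget]

lemma negStep_plain (tokens acc : List String) (i : Int) (t : String)
    (h : ¬ (t ∈ negTokens ∧ i + 1 < (tokens.length : Int))) :
    negStep tokens (acc, false) (i, t) = (acc ++ [t], false) := by
  simp only [negStep]
  rw [if_neg (by simp), if_neg h]

lemma bindNext_neg_single (t : String) (h : t ∈ negTokens) : bindNext [t] = [t] := by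
  conv_lhs => rw [bindNext.eq_def]
  simp [h]

lemma bindNext_neg_cons (t n : String) (rest : List String) (h : t ∈ negTokens) :
    bindNext (t :: n :: rest) = (t ++ "_" ++ n) :: bindNext rest := by
  conv_lhs => rw [bindNext.eq_def]
  simp [h]

lemma bindNext_cons (t : String) (rest : List String) (h : t ∉ negTokens) :
    bindNext (t :: rest) = t :: bindNext rest := by
  conv_lhs => rw [bindNext.eq_def]
  simp [h]

-- A's loop, started at any suffix of the token list with the skip flag down,
-- appends exactly bindNext of that suffix and ends with the flag down.
lemma foldA_eq (tokens : List String) (l : List String) :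
    ∀ (i : Nat) (acc : List String), tokens.drop i = l →
    (PySem.List.enumerate l (i : Int)).foldl (negStep tokens) (acc, false)
      = (acc ++ bindNext l, false) := by
  induction l using bindNext.induct with
  | case1 => intro i acc _; simp [PySem.List.enumerate, bindNext]
  | case2 t hneg =>
    intro i acc h
    have hlen : tokens.length = i + 1 := by
      have := congrArg List.length h
      simp [List.length_drop] at this
      omega
    rw [PySem.List.enumerate_cons, PySem.List.enumerate_nil, List.foldl_cons,
      negStep_plain tokens acc i t (by rw [hlen]; push_cast; omega),
      List.foldl_nil, bindNext_neg_single t hneg]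
  | case3 t hneg n rest' ih =>
    intro i acc h
    have hlen : i + 2 ≤ tokens.length := by
      have := congrArg List.length h
      simp [List.length_drop] at this
      omega
    have h1 : tokens[i + 1]? = some n := by
      rw [← List.getElem?_drop, h]; rfl
    have hget : PySem.List.pyGet? tokens ((i : Int) + 1) = some n := by
      have h2 := PySem.List.pyGet?_natCast tokens (i + 1)
      push_cast at h2
      rw [h2]; exact h1
    have hlt : (i : Int) + 1 < (tokens.length : Int) := by
      have : ((i + 2 : Nat) : Int) ≤ (tokens.length : Int) := by exact_mod_cast hlen
      push_cast at this; omega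
    have hdrop : tokens.drop (i + 2) = rest' := by
      have h2 : (tokens.drop i).drop 2 = tokens.drop (i + 2) := List.drop_drop
      rw [← h2, h]; rfl
    have hcast : (i : Int) + 1 + 1 = ((i + 2 : Nat) : Int) := by push_cast; ring
    rw [PySem.List.enumerate_cons, PySem.List.enumerate_cons, List.foldl_cons,
      negStep_bind tokens acc i t n hneg hlt hget, List.foldl_cons, negStep_skip,
      hcast, ih (i + 2) (acc ++ [t ++ "_" ++ n]) hdrop,
      bindNext_neg_cons t n rest' hneg]
    simp
  | case4 t rest hneg ih =>
    intro i acc h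
    have hdrop : tokens.drop (i + 1) = rest := by
      have h2 : (tokens.drop i).drop 1 = tokens.drop (i + 1) := List.drop_drop
      rw [← h2, h]; rfl
    have hcast : (i : Int) + 1 = ((i + 1 : Nat) : Int) := by push_cast; ring
    rw [PySem.List.enumerate_cons, List.foldl_cons,
      negStep_plain tokens acc i t (by simp [hneg]),
      hcast, ih (i + 1) (acc ++ [t]) hdrop, bindNext_cons t rest hneg]
    simp

-- ------- B-side stage 1: the runs fold flattens back and satisfies the invariant -------

lemma runsStep_good (runs : List (Bool × List String)) (tok : String)
    (h : goodRuns runs) :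
    goodRuns (runsStep runs tok) ∧ flatRuns (runsStep runs tok) = flatRuns runs ++ [tok] := by
  obtain ⟨hc, hm⟩ := h
  rcases List.eq_nil_or_concat runs with rfl | ⟨init, r, rfl⟩
  · refine ⟨⟨by simp [runsStep], ?_⟩, by simp [runsStep, flatRuns]⟩
    intro q hq
    simp [runsStep] at hq
    subst hq
    exact ⟨by simp, by intro w hw; simp at hw; subst hw; rfl⟩
  · simp only [List.concat_eq_append] at *
    by_cases hf : r.1 = decide (tok ∈ negTokens)
    · have hstep : runsStep (init ++ [r]) tok = init ++ [(r.1, r.2 ++ [tok])] := by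
        simp [runsStep, hf]
      rw [hstep]
      refine ⟨⟨?_, ?_⟩, ?_⟩
      · have heq : (init ++ [(r.1, r.2 ++ [tok])]).map Prod.fst = (init ++ [r]).map Prod.fst := by
          simp
        rw [heq]; exact hc
      · intro q hq
        rcases List.mem_append.mp hq with hq | hq
        · exact hm q (by simp [hq])
        · simp at hq
          subst hq
          refine ⟨by simp, ?_⟩
          intro w hw
          rcases List.mem_append.mp hw with hw | hw
          · exact (hm r (by simp)).2 w hw
          · simp at hw; subst hw; exact hf.symm
      · simp [flatRuns]
    · have hstep : runsStep (init ++ [r]) tok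
          = (init ++ [r]) ++ [(decide (tok ∈ negTokens), [tok])] := by
        simp [runsStep, hf]
      rw [hstep]
      refine ⟨⟨?_, ?_⟩, ?_⟩
      · rw [List.map_append]
        rw [List.isChain_append]
        refine ⟨hc, by simp, ?_⟩
        intro x hx y hy
        simp at hy
        have hx' : x = r.1 := by
          rw [List.map_append] at hx; simp at hx; exact hx.symm ▸ rfl
        rw [← hy, hx']
        exact hf
      · intro q hq
        rcases List.mem_append.mp hq with hq | hq
        · exact hm q hq
        · simp at hq
          subst hq
          exact ⟨by simp, by intro w hw; simp at hw; subst hw; rfl⟩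
      · simp [flatRuns]

lemma foldRuns_good (ts : List String) :
    ∀ runs, goodRuns runs →
      goodRuns (ts.foldl runsStep runs) ∧
      flatRuns (ts.foldl runsStep runs) = flatRuns runs ++ ts := by
  induction ts with
  | nil => intro runs h; exact ⟨h, by simp⟩
  | cons t ts ih =>
    intro runs h
    obtain ⟨h1, h2⟩ := runsStep_good runs t h
    obtain ⟨h3, h4⟩ := ih _ h1
    exact ⟨h3, by rw [List.foldl_cons] at *; rw [h4, h2]; simp⟩

-- ------- B-side stage 2 helpers -------

-- xs[-1] is the last element
lemma pyGet_neg_one (l : List String) : PySem.List.pyGet? l (-1) = l.getLast? := by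
  cases l with
  | nil => rfl
  | cons a t => simp [PySem.List.pyGet?, PySem.List.pyIdx?, List.getLast?_eq_getElem?]

-- the even/odd index pairing over range (n / 2) computes pairList
lemma map_pair_eq : ∀ ws : List String,
    List.map (fun k => (ws[2 * k]?.getD "") ++ "_" ++ (ws[2 * k + 1]?.getD ""))
        (List.range (ws.length / 2))
      = pairList ws := by
  intro ws
  induction ws using pairList.induct with
  | case1 => simp [pairList]
  | case2 a => simp [pairList]
  | case3 a b t ih =>
    have hlen : (a :: b :: t).length / 2 = t.length / 2 + 1 := by simp; omega
    rw [hlen, List.range_succ_eq_map, List.map_cons, List.map_map]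
    have hcongr : ∀ k ∈ List.range (t.length / 2),
        ((fun k => ((a :: b :: t)[2 * k]?.getD "") ++ "_" ++ ((a :: b :: t)[2 * k + 1]?.getD ""))
            ∘ Nat.succ) k
          = (fun k => (t[2 * k]?.getD "") ++ "_" ++ (t[2 * k + 1]?.getD "")) k := by
      intro k _
      have h1 : 2 * Nat.succ k = 2 * k + 1 + 1 := by omega
      have h2 : 2 * Nat.succ k + 1 = 2 * k + 1 + 1 + 1 := by omega
      simp only [Function.comp, h1, List.getElem?_cons_succ]
    rw [List.map_congr_left hcongr, ih]
    simp [pairList]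

-- the pairs for-loop over range(0, len-1, 2) computes pairList
lemma pairsFold_eq (ws : List String) :
    (PySem.List.pyRange 0 ((ws.length : Int) - 1) 2).foldl
        (fun acc j => acc ++ [((PySem.List.pyGet? ws j).getD "") ++ "_" ++
          ((PySem.List.pyGet? ws (j + 1)).getD "")]) []
      = pairList ws := by
  rw [PySem.List.pyRange_of_pos 0 ((ws.length : Int) - 1) (by norm_num)]
  rw [PySem.List.foldl_append_singleton_eq_map, List.map_map, List.nil_append]
  have hc : (if (0 : Int) < (ws.length : Int) - 1
        then (((ws.length : Int) - 1 - 0 + 2 - 1) / 2).toNat else 0) = ws.length / 2 := by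
    split_ifs with h
    · omega
    · omega
  rw [hc]
  refine Eq.trans (List.map_congr_left ?_) (map_pair_eq ws)
  intro k _
  simp only [Function.comp]
  have h1 := PySem.List.pyGet?_natCast ws (2 * k)
  have h2 := PySem.List.pyGet?_natCast ws (2 * k + 1)
  push_cast at h1 h2
  rw [zero_add, h1, h2]

-- greedy binding across an all-negation run
lemma bindNext_negRun : ∀ ws : List String, (∀ w ∈ ws, w ∈ negTokens) →
    ∀ rest, bindNext (ws ++ rest)
      = pairList ws ++
        (if ws.length % 2 = 1 then
          match rest with
          | [] => [ws.getLast?.getD ""]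
          | x :: xs => (ws.getLast?.getD "" ++ "_" ++ x) :: bindNext xs
        else bindNext rest) := by
  intro ws
  induction ws using pairList.induct with
  | case1 => intro _ rest; simp [pairList]
  | case2 a =>
    intro hneg rest
    have ha : a ∈ negTokens := hneg a (by simp)
    cases rest with
    | nil => simp [pairList, bindNext_neg_single a ha]
    | cons x xs =>
      simp only [List.cons_append, List.nil_append]
      rw [bindNext_neg_cons a x xs ha]
      simp [pairList]
  | case3 a b t ih =>
    intro hneg rest
    have ha : a ∈ negTokens := hneg a (by simp)
    simp only [List.cons_append]
    rw [bindNext_neg_cons a b _ ha, ih (fun w hw => hneg w (by simp [hw])) rest]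
    have hlen : (a :: b :: t).length % 2 = t.length % 2 := by
      simp only [List.length_cons]; omega
    by_cases hp : t.length % 2 = 1
    · have ht : t ≠ [] := by intro h; subst h; simp at hp
      obtain ⟨c, t', rfl⟩ := List.exists_cons_of_ne_nil ht
      simp [pairList, List.getLast?_cons_cons]
      have he : (t'.length + 1 + 1 + 1) % 2 = (t'.length + 1) % 2 := by omega
      rw [he]
      rfl
    · simp [pairList]
      have he : (t.length + 1 + 1) % 2 = t.length % 2 := by omega
      rw [he, if_neg hp, if_neg hp]

-- greedy binding passes an all-non-negation run through
lemma bindNext_passRun (ws : List String) (h : ∀ w ∈ ws, w ∉ negTokens) (rest : List String) :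
    bindNext (ws ++ rest) = ws ++ bindNext rest := by
  induction ws with
  | nil => rfl
  | cons w ws ih =>
    simp only [List.cons_append]
    rw [bindNext_cons w _ (h w (by simp)), ih (fun x hx => h x (by simp [hx]))]

-- ------- B-side main lemma -------

lemma goodRuns_tail (r : Bool × List String) (rs : List (Bool × List String))
    (h : goodRuns (r :: rs)) : goodRuns rs :=
  ⟨by have := h.1; rw [List.map_cons] at this; exact this.tail,
   fun q hq => h.2 q (List.mem_cons_of_mem r hq)⟩

lemma proc_eq : ∀ runs, goodRuns runs → procRuns runs = bindNext (flatRuns runs) := by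
  have main : ∀ (n : Nat) (runs : List (Bool × List String)), runs.length ≤ n →
      goodRuns runs → procRuns runs = bindNext (flatRuns runs) := by
    intro n
    induction n with
    | zero =>
      intro runs hlen _
      have : runs = [] := by cases runs <;> simp_all
      subst this; rfl
    | succ m ih =>
      intro runs hlen hgood
      cases runs with
      | nil => rfl
      | cons r rest =>
        obtain ⟨f, ws⟩ := r
        have hws : ∀ w ∈ ws, decide (w ∈ negTokens) = f := (hgood.2 (f, ws) (by simp)).2
        cases f with
        | false =>
          rw [procRuns.eq_def]
          simp only []
          rw [if_pos trivial]
          have hpass : ∀ w ∈ ws, w ∉ negTokens := by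
            intro w hw
            have := hws w hw
            simpa using this
          simp only [flatRuns, List.map_cons, List.flatten_cons]
          rw [bindNext_passRun ws hpass, ih rest (by simp at hlen; omega) (goodRuns_tail _ _ hgood)]
          rfl
        | true =>
          have hneg : ∀ w ∈ ws, w ∈ negTokens := by
            intro w hw
            have := hws w hw
            simpa using this
          rw [procRuns.eq_def]
          simp only []
          rw [if_neg (by simp : ¬ true = false), pairsFold_eq]
          simp only [flatRuns, List.map_cons, List.flatten_cons]
          by_cases hp : ws.length % 2 = 1
          · rw [if_pos hp]
            cases rest with
            | nil =>
              rw [bindNext_negRun ws hneg, if_pos hp]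
              simp [pyGet_neg_one]
            | cons r2 rest' =>
              obtain ⟨f2, follower⟩ := r2
              have hf2 : f2 = false := by
                have := hgood.1
                rw [List.map_cons, List.map_cons] at this
                have hr := this.rel_head
                simp at hr
                simpa using hr.symm
              subst hf2
              have hfol : follower ≠ [] := (hgood.2 (false, follower) (by simp)).1
              obtain ⟨x, fws, rfl⟩ := List.exists_cons_of_ne_nil hfol
              have hfolpass : ∀ w ∈ fws, w ∉ negTokens := by
                intro w hw
                have := (hgood.2 (false, x :: fws) (by simp)).2 w (by simp [hw])
                simpa using this
              have hrest2 : goodRuns rest' := goodRuns_tail _ _ (goodRuns_tail _ _ hgood)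
              simp only [List.map_cons, List.flatten_cons, ← List.append_assoc]
              rw [List.append_assoc ws]
              rw [bindNext_negRun ws hneg, if_pos hp]
              simp only [List.cons_append]
              rw [bindNext_passRun fws hfolpass,
                ih rest' (by simp at hlen; omega) hrest2]
              simp [pyGet_neg_one, PySem.List.slice_from_one, flatRuns]
          · rw [if_neg hp, bindNext_negRun ws hneg, if_neg hp,
              ih rest (by simp at hlen; omega) (goodRuns_tail _ _ hgood)]
            rfl
  intro runs hgood
  exact main runs.length runs le_rfl hgood

-- ===== VERDICT (by name: the statement is the Claim_ definition above) =====
theorem negation_binding_spec : Claim_equal_negation_binding := by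
  intro text _
  unfold Spec_negation_binding negation_binding negation_binding_alt
  have hA := foldA_eq (PySem.Str.split₀ text) (PySem.Str.split₀ text) 0 [] (by simp)
  simp only [Int.natCast_zero] at hA
  have hgood : goodRuns ([] : List (Bool × List String)) := ⟨by simp, by simp⟩
  obtain ⟨hg, hf⟩ := foldRuns_good (PySem.Str.split₀ text) [] hgood
  have hB := proc_eq _ hg
  rw [hf] at hB
  simp only [flatRuns] at hB
  simp [hA, hB]
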